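-- pv_equiv track=rewrite | github.com/tedchengf/ts_analysis | src/ts_analysis/dataframes/dframe.py | __rebuild_identity_dict
-- ===== SOURCE A (Python) =====
-- def __rebuild_identity_dict(identifier):
-- 	identity_dict = dict({})
-- 	repeated_identifier = []
-- 	for ind, curr_identi in enumerate(identifier):
-- 		if curr_identi in identity_dict:
-- 			repeated_identifier.append(curr_identi)
-- 		identity_dict.update({curr_identi:ind})
-- 	if len(repeated_identifier) > 0:
-- 		raise KeyError("The following identifiers are repeated: " + str(repeated_identifier))
-- 	return identity_dict
-- ===== SOURCE B (Python) =====
-- def __rebuild_identity_dict(identifier):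
-- 	identity_dict = {k: i for i, k in enumerate(identifier)}
-- 	if len(identity_dict) != len(identifier):
-- 		repeated = [x for x in identifier if identifier.count(x) > 1]
-- 		raise KeyError("The following identifiers are repeated: " + str(repeated))
-- 	return identity_dict
-- ===== Notes on version B (the rewrite author's own statement) =====
-- stated objective: idiomatic
-- what changed: B contains no membership test and no duplicate-collecting loop at all: it builds the index table with one dict comprehension and detects duplicates purely by comparing the table's cardinality with len(identifier), only then (error path, excluded by Pre_) gathering the offenders by counting.
import Mathlib
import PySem

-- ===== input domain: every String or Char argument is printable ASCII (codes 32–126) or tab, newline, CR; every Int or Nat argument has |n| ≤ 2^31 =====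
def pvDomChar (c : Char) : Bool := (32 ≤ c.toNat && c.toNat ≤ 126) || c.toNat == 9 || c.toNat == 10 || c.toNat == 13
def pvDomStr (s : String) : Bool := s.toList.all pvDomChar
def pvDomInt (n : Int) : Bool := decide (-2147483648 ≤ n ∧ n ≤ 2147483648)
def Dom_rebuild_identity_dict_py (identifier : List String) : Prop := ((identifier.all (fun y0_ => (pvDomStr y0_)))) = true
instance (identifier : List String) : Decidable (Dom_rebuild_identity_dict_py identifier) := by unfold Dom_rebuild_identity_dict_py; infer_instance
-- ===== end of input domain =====

-- B drops A's per-element membership test and duplicate list: it builds the table in one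
-- comprehension and detects duplicates by a cardinality comparison (objective: idiomatic).
-- Both raise KeyError on duplicates, which Pre_ excludes.

-- ===== PORT A =====
-- A: one loop over enumerate(identifier) carrying (identity_dict, repeated_identifier);
-- duplicates detected by membership in the dict being built. On duplicates Python raises
-- KeyError (excluded by Pre_); the port returns [] there.
def rebuild_identity_dict_py (identifier : List String) : List (String × Int) :=
  let st := (PySem.List.enumerate identifier 0).foldl
    (fun (st : PySem.Dict String Int × List String) p =>
      let rep := if st.1.contains p.2 then st.2 ++ [p.2] else st.2
      (st.1.insert p.2 p.1, rep))
    (PySem.Dict.empty, [])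
  if st.2.length > 0 then [] else st.1.items

-- ===== PORT B =====
-- B: one dict comprehension builds the table; duplicates exist iff len(dict) != len(identifier),
-- in which case Python raises KeyError (excluded by Pre_; the port returns [] there).
def rebuild_identity_dict_py_alt (identifier : List String) : List (String × Int) :=
  let identity_dict : PySem.Dict String Int :=
    (PySem.List.enumerate identifier 0).foldl (fun d p => d.insert p.2 p.1) PySem.Dict.empty
  if identity_dict.size ≠ identifier.length then [] else identity_dict.items

-- ===== PRECONDITION & SPEC =====
-- Pre_: A raises KeyError exactly when identifier contains a duplicate; such inputs are excluded.
def Pre_rebuild_identity_dict_py (identifier : List String) : Prop := identifier.Nodup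
instance (identifier : List String) : Decidable (Pre_rebuild_identity_dict_py identifier) := by unfold Pre_rebuild_identity_dict_py; infer_instance
def pvWitness_rebuild_identity_dict_py : List String := ["a", "b", "c"]

def Spec_rebuild_identity_dict_py (identifier : List String) (out : List (String × Int)) : Prop := out = rebuild_identity_dict_py_alt identifier
instance (identifier : List String) (out : List (String × Int)) : Decidable (Spec_rebuild_identity_dict_py identifier out) := by unfold Spec_rebuild_identity_dict_py; infer_instance

-- ===== CLAIM (what is proved, stated in full; the proofs are below) =====
def Claim_equal_rebuild_identity_dict_py : Prop := ∀ (identifier : List String), Dom_rebuild_identity_dict_py identifier → Pre_rebuild_identity_dict_py identifier → Spec_rebuild_identity_dict_py identifier (rebuild_identity_dict_py identifier)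

-- ===== LEMMAS AND PROOFS =====

-- A's pair-state fold projects onto the plain insert fold (first component).
theorem pvA_fst (l : List (Int × String)) (d : PySem.Dict String Int) (rep : List String) :
    (l.foldl (fun (st : PySem.Dict String Int × List String) p =>
        let r := if st.1.contains p.2 then st.2 ++ [p.2] else st.2
        (st.1.insert p.2 p.1, r)) (d, rep)).1
      = l.foldl (fun d p => d.insert p.2 p.1) d := by
  induction l generalizing d rep with
  | nil => rfl
  | cons p l ih => simp [List.foldl_cons, ih]

-- If no element of l is already a key and l's snds are distinct, A's repeated list stays put.
theorem pvA_snd (l : List (Int × String)) (d : PySem.Dict String Int) (rep : List String)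
    (hfresh : ∀ p ∈ l, p.2 ∉ d.keys) (hnd : (l.map (·.2)).Nodup) :
    (l.foldl (fun (st : PySem.Dict String Int × List String) p =>
        let r := if st.1.contains p.2 then st.2 ++ [p.2] else st.2
        (st.1.insert p.2 p.1, r)) (d, rep)).2 = rep := by
  induction l generalizing d rep with
  | nil => rfl
  | cons p l ih =>
    have hpc : d.contains p.2 = false := by
      rw [PySem.Dict.contains_eq_decide_mem_keys]
      simp [hfresh p (by simp)]
    simp only [List.map_cons, List.nodup_cons] at hnd
    simp only [List.foldl_cons, hpc, Bool.false_eq_true, if_false]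
    exact ih _ _ (fun q hq => by
      rw [PySem.Dict.keys_insert_of_not_contains _ _ hpc]
      simp only [List.mem_append, List.mem_singleton]
      rintro (h | h)
      · exact hfresh q (by simp [hq]) h
      · exact hnd.1 (h ▸ List.mem_map_of_mem hq)) hnd.2

-- With fresh, distinct keys, the insert fold appends every key: keys = d.keys ++ l.map (·.2).
theorem pvB_keys (l : List (Int × String)) (d : PySem.Dict String Int)
    (hfresh : ∀ p ∈ l, p.2 ∉ d.keys) (hnd : (l.map (·.2)).Nodup) :
    (l.foldl (fun d p => d.insert p.2 p.1) d).keys = d.keys ++ l.map (·.2) := by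
  induction l generalizing d with
  | nil => simp
  | cons p l ih =>
    have hpc : d.contains p.2 = false := by
      rw [PySem.Dict.contains_eq_decide_mem_keys]
      simp [hfresh p (by simp)]
    simp only [List.map_cons, List.nodup_cons] at hnd
    simp only [List.foldl_cons]
    rw [ih _ (fun q hq => by
        rw [PySem.Dict.keys_insert_of_not_contains _ _ hpc]
        simp only [List.mem_append, List.mem_singleton]
        rintro (h | h)
        · exact hfresh q (by simp [hq]) h
        · exact hnd.1 (h ▸ List.mem_map_of_mem hq)) hnd.2,
      PySem.Dict.keys_insert_of_not_contains _ _ hpc]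
    simp

-- ===== VERDICT (by name: the statement is the Claim_ definition above) =====
theorem rebuild_identity_dict_py_spec : Claim_equal_rebuild_identity_dict_py := by
  intro identifier _ hpre
  unfold Spec_rebuild_identity_dict_py rebuild_identity_dict_py rebuild_identity_dict_py_alt
  have hmap : (PySem.List.enumerate identifier 0).map (·.2) = identifier :=
    PySem.List.map_snd_enumerate identifier 0
  have hnd : ((PySem.List.enumerate identifier 0).map (·.2)).Nodup := by rw [hmap]; exact hpre
  have hfresh : ∀ p ∈ PySem.List.enumerate identifier 0, p.2 ∉ (PySem.Dict.empty : PySem.Dict String Int).keys := by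
    intro p _; simp [PySem.Dict.keys_empty]
  have hA := pvA_snd (PySem.List.enumerate identifier 0) PySem.Dict.empty [] hfresh hnd
  have hkeys := pvB_keys (PySem.List.enumerate identifier 0) PySem.Dict.empty hfresh hnd
  have hsize : ((PySem.List.enumerate identifier 0).foldl
      (fun d p => d.insert p.2 p.1) (PySem.Dict.empty : PySem.Dict String Int)).size
      = identifier.length := by
    have : ((PySem.List.enumerate identifier 0).foldl
        (fun d p => d.insert p.2 p.1) (PySem.Dict.empty : PySem.Dict String Int)).keys.length
        = identifier.length := by
      rw [hkeys, hmap]; simp [PySem.Dict.keys_empty]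
    simpa [PySem.Dict.keys, PySem.Dict.size] using this
  simp only [hA, pvA_fst, hsize, ne_eq, not_true_eq_false, if_false, List.length_nil,
    gt_iff_lt, lt_self_iff_false]
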